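-- pv_equiv track=rewrite | github.com/Bdarmits/cs_ucu_lab7 | square_processing.py | square_preceding
-- ===== SOURCE A (Python) =====
-- def square_preceding(values):
--
--     """ (list of number) -> NoneType
--
--     Replace each item in the list with square the value of the
--
--     preceding item, and replace the first item with 0.
--
--     # >>> L = [1, 2, 3]
--     #
--     # >>> square_preceding(L)
--     #
--     # >>> L
--
--     [0, 1, 4]
--
--     """
--     temp = []
--
--     if values != []:
--         temp.append(values[0])
--         values[0] = 0
--         for i in range(len(values)-1):
--             temp.append(values[i+1])
--             values[i+1] = temp[i] ** 2
--
--     return values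
-- ===== SOURCE B (Python) =====
-- def square_preceding(values):
--     # Reverse in-place pass: each slot still reads its original predecessor.
--     for i in range(len(values) - 1, 0, -1):
--         values[i] = values[i - 1] ** 2
--     if values:
--         values[0] = 0
--     return values
-- ===== Notes on version B (the rewrite author's own statement) =====
-- stated objective: simpler
-- what changed: Iterates the list in reverse so each slot reads its still-original predecessor directly, eliminating A's auxiliary temp buffer and its bookkeeping.
import Mathlib
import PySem

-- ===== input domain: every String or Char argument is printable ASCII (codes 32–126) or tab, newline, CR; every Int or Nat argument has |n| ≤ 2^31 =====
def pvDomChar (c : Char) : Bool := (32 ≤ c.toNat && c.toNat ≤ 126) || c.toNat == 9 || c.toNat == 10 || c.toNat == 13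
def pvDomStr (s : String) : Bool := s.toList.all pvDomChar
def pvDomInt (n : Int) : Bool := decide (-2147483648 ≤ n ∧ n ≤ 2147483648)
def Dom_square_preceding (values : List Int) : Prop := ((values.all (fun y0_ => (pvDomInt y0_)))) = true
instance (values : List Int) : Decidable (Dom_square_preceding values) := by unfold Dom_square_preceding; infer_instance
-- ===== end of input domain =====

-- B replaces A's forward pass with a shadow 'temp' buffer by a reverse in-place pass
-- (simpler: no auxiliary state). Both Pythons mutate `values` identically; the theorem is
-- about the returned list value.

-- ===== PORT A =====
-- All list indices below are provably in range, so `getD _ 0` is exact for Python's values[i].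
def square_preceding (values : List Int) : List Int :=
  if values ≠ [] then
    -- temp = [values[0]]; values[0] = 0; for i in range(len(values)-1): ...
    let st := (List.range (values.length - 1)).foldl
      (fun (st : List Int × List Int) i =>
        let temp := st.1 ++ [st.2.getD (i+1) 0]        -- temp.append(values[i+1])
        let vals := st.2.set (i+1) ((temp.getD i 0) ^ 2) -- values[i+1] = temp[i] ** 2
        (temp, vals))
      ([values.getD 0 0], values.set 0 0)
    st.2
  else values

-- ===== PORT B =====
def square_preceding_alt (values : List Int) : List Int :=
  -- for i in range(len(values)-1, 0, -1): values[i] = values[i-1] ** 2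
  let vals := (((List.range (values.length - 1)).map (· + 1)).reverse).foldl
    (fun vals i => vals.set i ((vals.getD (i - 1) 0) ^ 2)) values
  -- if values: values[0] = 0
  if vals ≠ [] then vals.set 0 0 else vals

-- ===== PRECONDITION & SPEC =====
def Spec_square_preceding (values : List Int) (out : List Int) : Prop := out = square_preceding_alt values
instance (values : List Int) (out : List Int) : Decidable (Spec_square_preceding values out) := by unfold Spec_square_preceding; infer_instance

-- ===== CLAIM (what is proved, stated in full; the proofs are below) =====
def Claim_equal_square_preceding : Prop := ∀ (values : List Int), Dom_square_preceding values → Spec_square_preceding values (square_preceding values)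

-- ===== LEMMAS AND PROOFS =====

theorem set_cons_add_one (a : Int) (l : List Int) (n : Nat) (x : Int) :
    (a :: l).set (n+1) x = a :: l.set n x := rfl

theorem lemA (values : List Int) (k : Nat) (hk : k + 1 ≤ values.length) :
    (List.range k).foldl
      (fun (st : List Int × List Int) i =>
        let temp := st.1 ++ [st.2.getD (i+1) 0]
        let vals := st.2.set (i+1) ((temp.getD i 0) ^ 2)
        (temp, vals))
      ([values.getD 0 0], values.set 0 0)
    = (values.take (k+1),
       0 :: ((values.take k).map (· ^ 2) ++ values.drop (k+1))) := by
  induction k with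
  | zero =>
      cases values with
      | nil => simp at hk
      | cons v t => simp
  | succ k ih =>
      have hk' : k + 1 ≤ values.length := by omega
      have hlt : k + 1 < values.length := by omega
      have hkl : k < values.length := by omega
      have htk : values.take (k+1) = values.take k ++ [values[k]] := by
        rw [List.take_succ]
        simp [List.getElem?_eq_getElem hkl]
      have hgd : values.getD k 0 = values[k] := by
        simp [List.getD, List.getElem?_eq_getElem hkl]
      have hdrop : values.drop (k+1) = values[k+1] :: values.drop (k+2) :=
        List.drop_eq_getElem_cons hlt
      have hlenA : ((values.take k).map (· ^ 2)).length = k := by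
        simp; omega
      rw [List.range_succ, List.foldl_append, ih hk']
      simp only [List.foldl_cons, List.foldl_nil]
      rw [Prod.mk.injEq]
      refine ⟨?_, ?_⟩
      · -- temp component
        have hget : (0 :: ((values.take k).map (· ^ 2) ++ values.drop (k+1))).getD (k+1) 0
            = values[k+1] := by
          rw [List.getD_cons_succ]
          rw [List.getD, List.getElem?_append_right (le_of_eq hlenA), hlenA]
          simp [List.getElem?_drop, List.getElem?_eq_getElem hlt]
        rw [hget]
        conv_rhs => rw [List.take_succ]
        simp [List.getElem?_eq_getElem hlt]
      · -- values component
        have hlen1 : (values.take (k+1)).length = k + 1 := by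
          simp; omega
        have htemp : ((values.take (k+1)) ++ [(0 :: ((values.take k).map (· ^ 2) ++ values.drop (k+1))).getD (k+1) 0]).getD k 0
            = values[k] := by
          have : (values.take (k+1))[k]? = some values[k] := by
            rw [List.getElem?_take_of_lt (by omega)]
            exact List.getElem?_eq_getElem hkl
          simp [List.getD, List.getElem?_append, hlen1, this]
        rw [htemp]
        rw [set_cons_add_one, hdrop]
        rw [List.set_append_right _ _ (le_of_eq hlenA), hlenA]
        have hmt : (values.take (k+1)).map (· ^ 2)
            = ((values.take k).map (· ^ 2)) ++ [values[k] ^ 2] := by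
          rw [htk, List.map_append]
          simp only [List.map_cons, List.map_nil]
        rw [hmt]
        simp
        rw [hdrop, List.set_cons_zero]

theorem lemB (k : Nat) (vals : List Int) (hk : k + 1 ≤ vals.length) :
    (((List.range k).map (· + 1)).reverse).foldl
      (fun vals i => vals.set i ((vals.getD (i - 1) 0) ^ 2)) vals
    = vals.take 1 ++ (vals.take k).map (· ^ 2) ++ vals.drop (k+1) := by
  induction k generalizing vals with
  | zero =>
      cases vals with
      | nil => simp at hk
      | cons v t => simp
  | succ k ih =>
      have hlt : k + 1 < vals.length := by omega
      have hkl : k < vals.length := by omega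
      have htk : vals.take (k+1) = vals.take k ++ [vals[k]] := by
        rw [List.take_succ]
        simp [List.getElem?_eq_getElem hkl]
      have hgd : vals.getD k 0 = vals[k] := by
        simp [List.getD, List.getElem?_eq_getElem hkl]
      have hd : List.drop (k+1) vals = vals[k+1] :: List.drop (k+2) vals :=
        List.drop_eq_getElem_cons hlt
      rw [List.range_succ]
      simp only [List.map_append, List.reverse_append, List.map_cons, List.map_nil,
        List.reverse_cons, List.reverse_nil, List.nil_append, List.cons_append,
        List.foldl_cons]
      set vals' := vals.set (k+1) ((vals.getD (k+1-1) 0) ^ 2) with hv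
      have hk' : k + 1 ≤ vals'.length := by simp [hv]; omega
      rw [ih vals' hk']
      have h1 : vals'.take 1 = vals.take 1 := by
        rw [hv, List.take_set_of_le (by omega)]
      have h2 : vals'.take k = vals.take k := by
        rw [hv, List.take_set_of_le (by omega)]
      have h3 : vals'.drop (k+1) = (vals[k] ^ 2) :: vals.drop (k+2) := by
        have hstep : vals'.drop (k+1) = (List.drop (k+1) vals).set 0 ((vals.getD (k+1-1) 0) ^ 2) := by
          rw [hv, List.drop_set]; simp
        rw [hstep, hd, List.set_cons_zero]
        simp [List.getElem?_eq_getElem hkl]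
      rw [h1, h2, h3]
      have hmt : (vals.take (k+1)).map (· ^ 2)
          = ((vals.take k).map (· ^ 2)) ++ [vals[k] ^ 2] := by
        rw [htk, List.map_append]
        simp only [List.map_cons, List.map_nil]
      rw [hmt]
      simp

-- ===== VERDICT (by name: the statement is the Claim_ definition above) =====
theorem square_preceding_spec : Claim_equal_square_preceding := by
  intro values _
  unfold Spec_square_preceding square_preceding square_preceding_alt
  cases values with
  | nil => simp
  | cons v t =>
      have hlen : (v :: t).length = t.length + 1 := by simp
      have hA := lemA (v :: t) t.length (by simp)
      have hB := lemB t.length (v :: t) (by simp)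
      simp only [hlen, Nat.add_sub_cancel] at *
      rw [hA]
      simp only [ne_eq, reduceCtorEq, not_false_eq_true, if_true, hB]
      have h1 : (v :: t).take 1 = [v] := by simp
      have h2 : (v :: t).drop (t.length + 1) = [] := by simp
      rw [h1, h2]
      have hne : ([v] ++ ((v :: t).take t.length).map (· ^ 2) ++ ([] : List Int)) ≠ [] := by
        simp
      rw [if_pos hne]
      simp
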